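-- pv_equiv track=rewrite | github.com/Tudor1415/django-vue-rest_Boilerplate | PiaBlogv2/playground.py | showPosts
-- ===== SOURCE A (Python) =====
-- def showPosts(posts):
--     objects = ['a', 'b', 'c', 'd', 'e', 'f', 'g', 'h']
--     count = 0
--     dimensions =[]
--
--     for i in range(0, posts):
--         if i % 8 == 0:
--             dimensions.append(count)
--             count += 1
--
--     if not dimensions:
--         dimensions.append(0)
--
--     return dimensions
-- ===== SOURCE B (Python) =====
-- def showPosts(posts):
--     k = (posts + 7) // 8
--     result = list(range(k))
--     if not result:
--         result = [0]
--     return result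
-- ===== Notes on version B (the rewrite author's own statement) =====
-- stated objective: simpler
-- what changed: Replaces the per-element loop with a modulo test by a closed-form count k = (posts + 7) // 8 and a single list(range(k)); the empty-case fallback [0] is kept.
import Mathlib
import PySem

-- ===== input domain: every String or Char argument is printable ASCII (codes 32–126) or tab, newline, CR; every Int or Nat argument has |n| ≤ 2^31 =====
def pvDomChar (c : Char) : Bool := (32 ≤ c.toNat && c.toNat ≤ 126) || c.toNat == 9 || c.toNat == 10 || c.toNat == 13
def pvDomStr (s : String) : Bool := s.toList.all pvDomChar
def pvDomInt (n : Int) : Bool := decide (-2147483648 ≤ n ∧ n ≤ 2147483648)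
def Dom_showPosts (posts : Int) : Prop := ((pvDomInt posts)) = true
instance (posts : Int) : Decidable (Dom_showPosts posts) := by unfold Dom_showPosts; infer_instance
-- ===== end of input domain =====

-- B replaces A's per-element loop (append on every multiple of 8) by the closed-form
-- count k = (posts + 7) // 8 and a single list(range(k)); objective: simpler.


-- ===== PORT A =====
-- the loop: for i in range(0, posts): if i % 8 == 0: dimensions.append(count); count += 1
-- state = (count, dimensions)
def showPostsLoop (posts : Int) : Int × List Int :=
  (PySem.List.pyRange 0 posts 1).foldl
    (fun (st : Int × List Int) i =>
      if PySem.Int.mod i 8 = 0 then (st.1 + 1, st.2 ++ [st.1]) else st)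
    (0, [])

-- literal port of A: run the loop, then 'if not dimensions: dimensions.append(0)'
def showPosts (posts : Int) : List Int :=
  if (showPostsLoop posts).2 = [] then [0] else (showPostsLoop posts).2

-- ===== PORT B =====
-- result = list(range((posts + 7) // 8))
def showPostsAltRange (posts : Int) : List Int :=
  PySem.List.pyRange 0 (PySem.Int.floordiv (posts + 7) 8) 1

-- literal port of Source B: closed-form k, list(range(k)), fallback [0] when empty
def showPosts_alt (posts : Int) : List Int :=
  if showPostsAltRange posts = [] then [0] else showPostsAltRange posts

-- ===== PRECONDITION & SPEC =====
def Spec_showPosts (posts : Int) (out : List Int) : Prop := out = showPosts_alt posts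
instance (posts : Int) (out : List Int) : Decidable (Spec_showPosts posts out) := by unfold Spec_showPosts; infer_instance

-- ===== CLAIM (what is proved, stated in full; the proofs are below) =====
def Claim_equal_showPosts : Prop := ∀ (posts : Int), Dom_showPosts posts → Spec_showPosts posts (showPosts posts)

-- ===== LEMMAS AND PROOFS =====

theorem pyRange_cast (n : Nat) :
    PySem.List.pyRange 0 ((n : Int)) 1 = (List.range n).map (fun k => (k : Int)) := by
  rw [PySem.List.pyRange_zero_natCast]
  induction (List.range n) with
  | nil => rfl
  | cons a l ih => simpa using ih

-- A's loop over range(0, n) ends in state (⌈n/8⌉, [0, 1, …, ⌈n/8⌉-1]).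
theorem showPostsLoop_eq (n : Nat) :
    showPostsLoop (n : Int)
    = ((((n + 7) / 8 : Nat) : Int), (List.range ((n + 7) / 8)).map (fun k => (k : Int))) := by
  induction n with
  | zero => simp [showPostsLoop, PySem.List.pyRange_one_eq_nil]
  | succ m ih =>
    unfold showPostsLoop at ih ⊢
    rw [show ((m + 1 : Nat) : Int) = (m : Int) + 1 by push_cast; ring,
        PySem.List.pyRange_one_succ_right (by positivity), List.foldl_append, ih]
    by_cases hm : m % 8 = 0
    · have hdvd : (8 : Int) ∣ (m : Int) := by
        exact_mod_cast (Nat.dvd_of_mod_eq_zero hm)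
      have hk : (m + 1 + 7) / 8 = (m + 7) / 8 + 1 := by omega
      simp [hdvd, hk, List.range_succ]
    · have hdvd : ¬ (8 : Int) ∣ (m : Int) := by
        exact_mod_cast (by omega : ¬ (8 : Nat) ∣ m)
      have hk : (m + 1 + 7) / 8 = (m + 7) / 8 := by omega
      simp [hdvd, hk]

theorem showPostsAltRange_eq (n : Nat) :
    showPostsAltRange (n : Int) = (List.range ((n + 7) / 8)).map (fun k => (k : Int)) := by
  unfold showPostsAltRange
  have hk : PySem.Int.floordiv ((n : Int) + 7) 8 = (((n + 7) / 8 : Nat) : Int) := by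
    rw [show ((n : Int) + 7) = ((n + 7 : Nat) : Int) by push_cast; ring]
    exact_mod_cast PySem.Int.floordiv_natCast (n + 7) 8
  rw [hk, pyRange_cast]

-- ===== VERDICT (by name: the statement is the Claim_ definition above) =====
theorem showPosts_spec : Claim_equal_showPosts := by
  intro posts _
  unfold Spec_showPosts showPosts showPosts_alt
  by_cases hp : posts ≤ 0
  · have hk : PySem.Int.floordiv (posts + 7) 8 ≤ 0 := by
      rw [PySem.Int.floordiv_eq_ediv_of_pos (by norm_num)]
      omega
    rw [show showPostsLoop posts = (0, []) by
          unfold showPostsLoop; rw [PySem.List.pyRange_one_eq_nil hp]; rfl,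
        show showPostsAltRange posts = [] by
          unfold showPostsAltRange; exact PySem.List.pyRange_one_eq_nil hk]
  · rw [not_le] at hp
    obtain ⟨n, rfl⟩ : ∃ n : Nat, posts = (n : Int) := ⟨posts.toNat, by omega⟩
    rw [showPostsLoop_eq, showPostsAltRange_eq]
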